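-- pv_equiv track=rewrite | github.com/ychampion/codeclaw | codeclaw/secrets.py | _has_mixed_char_types
-- ===== SOURCE A (Python) =====
-- def _has_mixed_char_types(s: str) -> bool:
--     """Check if string has a mix of uppercase, lowercase, and digits."""
--     has_upper = has_lower = has_digit = False
--     for c in s:
--         if c.isupper():
--             has_upper = True
--         elif c.islower():
--             has_lower = True
--         elif c.isdigit():
--             has_digit = True
--         if has_upper and has_lower and has_digit:
--             return True
--     return False
-- ===== SOURCE B (Python) =====
-- def _has_mixed_char_types(s: str) -> bool:
--     """Check if string has a mix of uppercase, lowercase, and digits."""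
--     return (any(c.isupper() for c in s)
--             and any(c.islower() for c in s)
--             and any(c.isdigit() for c in s))
-- ===== Notes on version B (the rewrite author's own statement) =====
-- stated objective: idiomatic
-- what changed: Replaces the single fused early-exit loop maintaining three flags by three independent any() scans combined with short-circuit and.
import Mathlib
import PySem

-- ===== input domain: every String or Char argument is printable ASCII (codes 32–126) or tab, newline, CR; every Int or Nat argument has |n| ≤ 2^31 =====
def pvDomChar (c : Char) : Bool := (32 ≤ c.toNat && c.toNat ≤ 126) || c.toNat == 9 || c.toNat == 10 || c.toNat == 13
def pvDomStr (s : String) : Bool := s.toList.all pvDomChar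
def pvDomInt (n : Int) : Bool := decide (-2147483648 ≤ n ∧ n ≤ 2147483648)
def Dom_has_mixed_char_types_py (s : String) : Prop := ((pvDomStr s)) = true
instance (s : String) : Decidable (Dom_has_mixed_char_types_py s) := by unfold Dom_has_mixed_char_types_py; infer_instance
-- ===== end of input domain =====

-- B replaces A's single fused early-exit loop with three flags by three independent
-- character scans combined with short-circuit `and` (idiomatic; same O(n) cost).


-- ===== PORT A =====
-- the for-loop of A: three flags, elif chain, early return once all three hold
def hmctLoop : List Char → Bool → Bool → Bool → Bool
  | [], _, _, _ => false
  | c :: rest, hu, hl, hd =>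
    let hu' := if PySem.Chars.isupper c then true else hu
    let hl' := if PySem.Chars.isupper c then hl
               else if PySem.Chars.islower c then true else hl
    let hd' := if PySem.Chars.isupper c then hd
               else if PySem.Chars.islower c then hd
               else if PySem.Chars.isdigit c then true else hd
    if hu' && hl' && hd' then true else hmctLoop rest hu' hl' hd'

def has_mixed_char_types_py (s : String) : Bool :=
  hmctLoop s.toList false false false

-- ===== PORT B =====
def has_mixed_char_types_py_alt (s : String) : Bool :=
  s.toList.any PySem.Chars.isupper
    && s.toList.any PySem.Chars.islower
    && s.toList.any PySem.Chars.isdigit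

-- ===== PRECONDITION & SPEC =====
def Spec_has_mixed_char_types_py (s : String) (out : Bool) : Prop := out = has_mixed_char_types_py_alt s
instance (s : String) (out : Bool) : Decidable (Spec_has_mixed_char_types_py s out) := by unfold Spec_has_mixed_char_types_py; infer_instance

-- ===== CLAIM (what is proved, stated in full; the proofs are below) =====
def Claim_equal_has_mixed_char_types_py : Prop := ∀ (s : String), Dom_has_mixed_char_types_py s → Spec_has_mixed_char_types_py s (has_mixed_char_types_py s)

-- ===== LEMMAS AND PROOFS =====

-- Python's isupper/islower/isdigit character classes are mutually exclusive
theorem hmct_excl (c : Char) :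
    (PySem.Chars.isupper c = true → PySem.Chars.islower c = false ∧ PySem.Chars.isdigit c = false)
    ∧ (PySem.Chars.islower c = true → PySem.Chars.isdigit c = false) := by
  simp only [PySem.Chars.isupper, PySem.Chars.islower, PySem.Chars.isdigit,
    Bool.and_eq_true, Bool.and_eq_false_iff, decide_eq_true_eq, decide_eq_false_iff_not,
    Char.le_def, UInt32.le_iff_toNat_le, not_le]
  have hA : 'A'.val.toNat = 65 := rfl
  have hZ : 'Z'.val.toNat = 90 := rfl
  have ha : 'a'.val.toNat = 97 := rfl
  have hz : 'z'.val.toNat = 122 := rfl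
  have h0 : '0'.val.toNat = 48 := rfl
  have h9 : '9'.val.toNat = 57 := rfl
  omega

-- loop invariant: as long as not all three flags are already set, A's fused loop
-- computes exactly "each flag or its class occurs in the remaining characters"
theorem hmctLoop_eq (l : List Char) : ∀ hu hl hd : Bool, (hu && hl && hd) = false →
    hmctLoop l hu hl hd =
      ((hu || l.any PySem.Chars.isupper)
        && (hl || l.any PySem.Chars.islower)
        && (hd || l.any PySem.Chars.isdigit)) := by
  induction l with
  | nil => intro hu hl hd h; simpa [hmctLoop] using h.symm
  | cons c rest ih =>
    intro hu hl hd h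
    obtain ⟨hUL, hLD⟩ := hmct_excl c
    cases hU : PySem.Chars.isupper c <;> cases hL : PySem.Chars.islower c <;>
      cases hD : PySem.Chars.isdigit c <;>
        cases hu <;> cases hl <;> cases hd <;>
          simp_all [hmctLoop, ih]

-- ===== VERDICT (by name: the statement is the Claim_ definition above) =====
theorem has_mixed_char_types_py_spec : Claim_equal_has_mixed_char_types_py := by
  intro s _
  unfold Spec_has_mixed_char_types_py has_mixed_char_types_py has_mixed_char_types_py_alt
  rw [hmctLoop_eq _ false false false rfl]
  simp
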